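-- pv_equiv track=rewrite | github.com/wjohnsson/adventofcode | 2019/04/secure_container.py | first_criteria
-- ===== SOURCE A (Python) =====
-- def first_criteria(n):
--     double_digits = False
--     while n:
--         prev = n % 10
--         n //= 10
--         curr = n % 10
--
--         if prev < curr:
--             # Digits are decreasing going from left to right
--             return False
--         if prev == curr:
--             # Two adjacent digits are the same
--             double_digits = True
--     return double_digits
-- ===== SOURCE B (Python) =====
-- def first_criteria(n):
--     d = str(n)
--     pairs = list(zip(d, d[1:]))
--     non_decreasing = all(a <= b for a, b in pairs)
--     has_double = any(a == b for a, b in pairs)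
--     return non_decreasing and has_double
-- ===== Notes on version B (the rewrite author's own statement) =====
-- stated objective: simpler
-- what changed: A's single fused short-circuiting arithmetic loop (repeated % 10 and //= 10 with an early return and a carried flag) is replaced by building the digit string once and running two independent adjacent-pair scans (all non-decreasing, any equal) over it.
-- outside the precondition, e.g. on first_criteria(-11): A returns False, B returns True; on first_criteria(-1): A does not finish within the time limit, B returns False
import Mathlib
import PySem

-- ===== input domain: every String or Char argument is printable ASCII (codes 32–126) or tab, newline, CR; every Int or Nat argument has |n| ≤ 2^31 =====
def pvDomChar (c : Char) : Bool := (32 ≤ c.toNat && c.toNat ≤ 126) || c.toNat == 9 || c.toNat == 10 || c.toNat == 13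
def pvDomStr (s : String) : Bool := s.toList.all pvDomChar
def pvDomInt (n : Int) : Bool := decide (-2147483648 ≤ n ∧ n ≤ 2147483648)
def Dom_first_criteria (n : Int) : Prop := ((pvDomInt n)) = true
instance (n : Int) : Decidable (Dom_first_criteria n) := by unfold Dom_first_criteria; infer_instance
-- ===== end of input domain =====

-- B replaces A's fused short-circuiting arithmetic digit loop by building the digit string once
-- and running two independent adjacent-pair scans (simpler decomposition; return value only).


-- ===== PORT A =====
-- 'while n:' loop; the 'n ≤ 0' guard is a totality guard only: Python exits at n = 0 and
-- diverges for negative n (excluded by Pre_).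
def first_criteria_loop (n : Int) (dd : Bool) : Bool :=
  if n ≤ 0 then dd
  else
    let prev := PySem.Int.mod n 10
    let n' := PySem.Int.floordiv n 10
    let curr := PySem.Int.mod n' 10
    if prev < curr then false
    else first_criteria_loop n' (if prev = curr then true else dd)
termination_by n.toNat
decreasing_by
  have h10 : PySem.Int.floordiv n 10 = n / 10 := PySem.Int.floordiv_eq_ediv_of_pos (by omega)
  simp only [h10]
  omega

def first_criteria (n : Int) : Bool := first_criteria_loop n false

-- ===== PORT B =====
def first_criteria_alt (n : Int) : Bool :=
  let d := (PySem.Int.toStr n).toList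
  let pairs := d.zip d.tail
  let nonDecreasing := pairs.all (fun p => decide (p.1 ≤ p.2))
  let hasDouble := pairs.any (fun p => p.1 == p.2)
  nonDecreasing && hasDouble

-- ===== PRECONDITION & SPEC =====
-- Pre_ excludes negative n, outside the function's natural domain (an AoC password number):
-- there 'n //= 10' floors toward -∞, so A diverges on some inputs (e.g. -1, stuck at n = -1)
-- and on the rest returns values read off Python's negative-modulo residues, an accident of
-- the implementation (A(-11) = False although str(-11) has the adjacent pair '11').
def Pre_first_criteria (n : Int) : Prop := 0 ≤ n
instance (n : Int) : Decidable (Pre_first_criteria n) := by unfold Pre_first_criteria; infer_instance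
def pvWitness_first_criteria : Int := (111122)

def Spec_first_criteria (n : Int) (out : Bool) : Prop := out = first_criteria_alt n
instance (n : Int) (out : Bool) : Decidable (Spec_first_criteria n out) := by unfold Spec_first_criteria; infer_instance

-- ===== CLAIM (what is proved, stated in full; the proofs are below) =====
def Claim_equal_first_criteria : Prop := ∀ (n : Int), Dom_first_criteria n → Pre_first_criteria n → Spec_first_criteria n (first_criteria n)

-- ===== LEMMAS AND PROOFS =====

-- the two criteria read off the least-significant-first digit list
def ndA (m : Nat) : Bool :=
  ((Nat.digits 10 m).zip (Nat.digits 10 m).tail).all (fun p => decide (p.2 ≤ p.1))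
def eqA (m : Nat) : Bool :=
  ((Nat.digits 10 m).zip (Nat.digits 10 m).tail).any (fun p => p.1 == p.2)

theorem digits_step (m : Nat) (h : m ≠ 0) :
    Nat.digits 10 m = m % 10 :: Nat.digits 10 (m / 10) :=
  Nat.digits_def' (by omega) (Nat.pos_of_ne_zero h)

theorem ndA_step (m : Nat) (h : 10 ≤ m) :
    ndA m = (decide (m / 10 % 10 ≤ m % 10) && ndA (m / 10)) := by
  have h10 : m / 10 ≠ 0 := by omega
  unfold ndA
  rw [digits_step m (by omega), digits_step (m / 10) h10]
  simp [List.all_cons]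

theorem eqA_step (m : Nat) (h : 10 ≤ m) :
    eqA m = ((m % 10 == m / 10 % 10) || eqA (m / 10)) := by
  have h10 : m / 10 ≠ 0 := by omega
  unfold eqA
  rw [digits_step m (by omega), digits_step (m / 10) h10]
  simp [List.any_cons]

theorem loop_eq_digits (m : Nat) : ∀ dd : Bool,
    first_criteria_loop (m : Int) dd = (ndA m && (dd || eqA m)) := by
  induction m using Nat.strong_induction_on with
  | _ m ih =>
    intro dd
    by_cases h0 : m = 0
    · subst h0
      rw [first_criteria_loop]
      simp [ndA, eqA]
    · rw [first_criteria_loop]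
      have hpos : ¬ ((m : Int) ≤ 0) := by omega
      simp only [hpos, if_false]
      have hmod : PySem.Int.mod (m : Int) 10 = ((m % 10 : Nat) : Int) := by
        exact_mod_cast PySem.Int.mod_natCast m 10
      have hdiv : PySem.Int.floordiv (m : Int) 10 = ((m / 10 : Nat) : Int) := by
        exact_mod_cast PySem.Int.floordiv_natCast m 10
      have hmod2 : PySem.Int.mod ((m / 10 : Nat) : Int) 10 = ((m / 10 % 10 : Nat) : Int) := by
        exact_mod_cast PySem.Int.mod_natCast (m / 10) 10
      simp only [hmod, hdiv, hmod2]
      by_cases hsmall : m < 10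
      · -- single digit: m / 10 = 0, digits m = [m]
        have hq : m / 10 = 0 := by omega
        have hmm : m % 10 = m := by omega
        rw [hq, hmm]
        rw [if_neg (by omega : ¬ ((m : Int) < ((0 : Nat) : Int)))]
        rw [if_neg (show ¬ ((m : Int) = ((0 : Nat) : Int)) by exact_mod_cast h0)]
        rw [first_criteria_loop]
        have hL : Nat.digits 10 m = [m] := by
          rw [digits_step m h0, hmm, hq]; simp
        simp [ndA, eqA, hL]
      · -- m ≥ 10
        have h10 : 10 ≤ m := by omega
        rw [ndA_step m h10, eqA_step m h10]
        by_cases hlt : m % 10 < m / 10 % 10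
        · rw [if_pos (by exact_mod_cast hlt)]
          have hnle : ¬ (m / 10 % 10 ≤ m % 10) := by omega
          simp [hnle]
        · rw [if_neg (show ¬ (((m % 10 : Nat) : Int) < ((m / 10 % 10 : Nat) : Int)) by
            exact_mod_cast hlt)]
          have hle : m / 10 % 10 ≤ m % 10 := by omega
          by_cases heq : m % 10 = m / 10 % 10
          · rw [if_pos (by exact_mod_cast heq : ((m % 10 : Nat) : Int) = ((m / 10 % 10 : Nat) : Int))]
            rw [ih (m / 10) (by omega) true]
            simp [heq]
          · rw [if_neg (show ¬ (((m % 10 : Nat) : Int) = ((m / 10 % 10 : Nat) : Int)) by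
              exact_mod_cast heq)]
            rw [ih (m / 10) (by omega) dd]
            have hbeq : (m % 10 == m / 10 % 10) = false := by simp [heq]
            simp [hle, hbeq]

-- Nat.toDigits vs Nat.digits (MSB-first chars vs LSB-first nat digits)
theorem toDigitsCore_eq_digits : ∀ (f n : Nat) (acc : List Char), n ≠ 0 → n ≤ f →
    Nat.toDigitsCore 10 f n acc = ((Nat.digits 10 n).map Nat.digitChar).reverse ++ acc := by
  intro f
  induction f with
  | zero => intro n acc h hf; omega
  | succ f ih =>
    intro n acc h hf
    rw [Nat.toDigitsCore]
    rw [digits_step n h]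
    by_cases hq : n / 10 = 0
    · simp [hq]
    · have hlt : n / 10 < n := Nat.div_lt_self (Nat.pos_of_ne_zero h) (by omega)
      have hbound : n / 10 ≤ f := by omega
      have hrec := ih (n / 10) (Nat.digitChar (n % 10) :: acc) hq hbound
      simp only [hq, if_false]
      rw [hrec, digits_step (n / 10) hq]
      simp

theorem toDigits_eq_digits (m : Nat) (h : m ≠ 0) :
    Nat.toDigits 10 m = ((Nat.digits 10 m).map Nat.digitChar).reverse := by
  unfold Nat.toDigits
  rw [toDigitsCore_eq_digits (m + 1) m [] h (by omega)]
  simp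

-- digitChar preserves order and equality of digits
theorem digitChar_cmp : ∀ a, a < 10 → ∀ b, b < 10 →
    (decide (Nat.digitChar a ≤ Nat.digitChar b) = decide (a ≤ b)) ∧
    ((Nat.digitChar a == Nat.digitChar b) = (a == b)) := by decide

-- adjacent pairs of xs ++ [y]
theorem zip_tail_append_singleton : ∀ (xs : List Char) (hx : xs ≠ []) (y : Char),
    (xs ++ [y]).zip ((xs ++ [y]).tail) = xs.zip xs.tail ++ [(xs.getLast hx, y)] := by
  intro xs
  induction xs with
  | nil => intro hx; exact absurd rfl hx
  | cons x xs ih =>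
    intro _ y
    cases xs with
    | nil => simp
    | cons x2 xs2 =>
      have := ih (by simp) y
      simp only [List.cons_append, List.zip_cons_cons, List.tail_cons] at *
      rw [List.getLast_cons (by simp)]
      simp [this]

-- B's two scans over the character string compute ndA and eqA
theorem alt_chars (m : Nat) (h : m ≠ 0) :
    let d := ((Nat.digits 10 m).map Nat.digitChar).reverse
    ((d.zip d.tail).all (fun p => decide (p.1 ≤ p.2)) = ndA m) ∧
    ((d.zip d.tail).any (fun p => p.1 == p.2) = eqA m) ∧
    (d ≠ []) ∧ (∀ hd : d ≠ [], d.getLast hd = Nat.digitChar (m % 10)) := by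
  induction m using Nat.strong_induction_on with
  | _ m ih =>
    intro d
    have hne : d ≠ [] := by
      simp only [d, ne_eq, List.reverse_eq_nil_iff, List.map_eq_nil_iff]
      exact Nat.digits_ne_nil_iff_ne_zero.mpr h
    have hlast : ∀ hd : d ≠ [], d.getLast hd = Nat.digitChar (m % 10) := by
      intro hd
      have : d.getLast? = some (Nat.digitChar (m % 10)) := by
        simp only [d, List.getLast?_reverse]
        rw [digits_step m h]
        simp
      rw [List.getLast?_eq_some_getLast hd] at this
      injection this
    by_cases hsmall : m < 10
    · have hL : Nat.digits 10 m = [m % 10] := by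
        rw [digits_step m h]
        have : m / 10 = 0 := by omega
        simp [this]
      refine ⟨?_, ?_, hne, hlast⟩ <;> simp [d, hL, ndA, eqA]
    · have h10 : 10 ≤ m := by omega
      have hq : m / 10 ≠ 0 := by omega
      obtain ⟨iha, ihb, ihne, ihlast⟩ := ih (m / 10) (by omega) hq
      have hd : d = ((Nat.digits 10 (m / 10)).map Nat.digitChar).reverse ++
          [Nat.digitChar (m % 10)] := by
        simp only [d]
        rw [digits_step m h]
        simp
      have hz := zip_tail_append_singleton
        (((Nat.digits 10 (m / 10)).map Nat.digitChar).reverse) ihne (Nat.digitChar (m % 10))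
      rw [ihlast ihne] at hz
      have hcmp := digitChar_cmp (m / 10 % 10) (by omega) (m % 10) (by omega)
      refine ⟨?_, ?_, hne, hlast⟩
      · rw [hd, hz, List.all_append, iha, ndA_step m h10]
        simp only [List.all_cons, List.all_nil, Bool.and_true]
        rw [hcmp.1]
        exact Bool.and_comm _ _
      · rw [hd, hz, List.any_append, ihb, eqA_step m h10]
        simp only [List.any_cons, List.any_nil, Bool.or_false]
        rw [hcmp.2]
        have : (m / 10 % 10 == m % 10) = (m % 10 == m / 10 % 10) := by
          simp [eq_comm]
        rw [this]
        exact Bool.or_comm _ _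

theorem alt_eq_digits (m : Nat) : first_criteria_alt (m : Int) = (ndA m && eqA m) := by
  unfold first_criteria_alt
  simp only [PySem.Int.toList_toStr]
  have hchars : PySem.Int.toChars (m : Int) = Nat.toDigits 10 m := by
    unfold PySem.Int.toChars
    have : ¬ ((m : Int) < 0) := by omega
    simp [this]
  rw [hchars]
  by_cases h : m = 0
  · subst h
    simp only [ndA, eqA]
    decide
  · rw [toDigits_eq_digits m h]
    obtain ⟨ha, hb, _, _⟩ := alt_chars m h
    rw [ha, hb]

-- ===== VERDICT (by name: the statement is the Claim_ definition above) =====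
theorem first_criteria_spec : Claim_equal_first_criteria := by
  intro n _ hpre
  have h0 : 0 ≤ n := hpre
  unfold Spec_first_criteria first_criteria
  obtain ⟨m, rfl⟩ : ∃ m : Nat, n = (m : Int) := ⟨n.toNat, by omega⟩
  rw [loop_eq_digits m false, alt_eq_digits m]
  simp
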